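-- pv_equiv track=rewrite | github.com/ANuKI-RT/CPP-Readability | cpp-readability-prediction/readability_for_c/wordnet.py | _trim_non_letter
-- ===== SOURCE A (Python) =====
-- def _trim_non_letter(word: str) -> str:
--     start = 0
--     end = len(word)
--     for i in range(len(word)):
--         if word[i].isalpha():
--             start = i
--             break
--     for i in range(len(word) - 1, -1, -1):
--         if word[i].isalpha():
--             end = i + 1
--             break
--     return word[start:end]
-- ===== SOURCE B (Python) =====
-- def _trim_non_letter(word: str) -> str:
--     idx = [i for i, c in enumerate(word) if c.isalpha()]
--     if not idx:
--         return word
--     return word[idx[0]:idx[-1] + 1]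
-- ===== Notes on version B (the rewrite author's own statement) =====
-- stated objective: idiomatic
-- what changed: Replaces A's two directional early-breaking index scans by one forward pass collecting all alphabetic indices, then one boundary slice from the first to the last collected index (whole word returned when none).
import Mathlib
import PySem

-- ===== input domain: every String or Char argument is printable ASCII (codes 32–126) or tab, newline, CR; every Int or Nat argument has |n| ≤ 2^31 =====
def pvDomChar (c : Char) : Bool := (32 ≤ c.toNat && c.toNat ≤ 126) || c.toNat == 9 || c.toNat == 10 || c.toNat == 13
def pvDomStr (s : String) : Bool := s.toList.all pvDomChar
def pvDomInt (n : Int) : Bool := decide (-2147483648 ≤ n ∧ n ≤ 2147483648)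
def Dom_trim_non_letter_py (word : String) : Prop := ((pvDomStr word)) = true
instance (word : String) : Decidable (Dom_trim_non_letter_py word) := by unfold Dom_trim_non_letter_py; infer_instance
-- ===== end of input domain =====

-- B replaces A's two directional early-breaking scans by one index-collecting pass plus a boundary slice (idiomatic, same cost).


-- ===== PORT A =====
-- forward loop 'for i in range(len(word)): if word[i].isalpha(): start = i; break'
-- (indices produced by pyRange are always in range, so word[i] is pyGetD with an unreachable default)
def pvFwdLoop (cs : List Char) : List Int → Option Int
  | [] => none
  | i :: rest =>
      if PySem.Chars.isalpha (PySem.List.pyGetD cs i ' ') then some i else pvFwdLoop cs rest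

-- backward loop 'for i in range(len(word)-1, -1, -1): if word[i].isalpha(): end = i + 1; break'
def pvBwdLoop (cs : List Char) : List Int → Option Int
  | [] => none
  | i :: rest =>
      if PySem.Chars.isalpha (PySem.List.pyGetD cs i ' ') then some (i + 1) else pvBwdLoop cs rest

def trim_non_letter_py (word : String) : String :=
  let n : Int := PySem.Str.len word
  let start : Int := (pvFwdLoop word.toList (PySem.List.pyRange 0 n 1)).getD 0
  let stop : Int := (pvBwdLoop word.toList (PySem.List.pyRange (n - 1) (-1) (-1))).getD n
  PySem.Str.slice word (some start) (some stop)

-- ===== PORT B =====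
-- 'idx = [i for i, c in enumerate(word) if c.isalpha()]'
def pvAlphaIdx (cs : List Char) (s : Int) : List Int :=
  ((PySem.List.enumerate cs s).filter (fun p => PySem.Chars.isalpha p.2)).map (·.1)

def trim_non_letter_py_alt (word : String) : String :=
  let idx : List Int := pvAlphaIdx word.toList 0
  match idx with
  | [] => word
  | f :: _ => PySem.Str.slice word (some f) (some (PySem.List.pyGetD idx (-1) 0 + 1))

-- ===== PRECONDITION & SPEC =====
def Spec_trim_non_letter_py (word : String) (out : String) : Prop := out = trim_non_letter_py_alt word
instance (word : String) (out : String) : Decidable (Spec_trim_non_letter_py word out) := by unfold Spec_trim_non_letter_py; infer_instance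

-- ===== CLAIM (what is proved, stated in full; the proofs are below) =====
def Claim_equal_trim_non_letter_py : Prop := ∀ (word : String), Dom_trim_non_letter_py word → Spec_trim_non_letter_py word (trim_non_letter_py word)

-- ===== LEMMAS AND PROOFS =====

theorem pvAlphaIdx_nil (s : Int) : pvAlphaIdx [] s = [] := rfl

theorem pvAlphaIdx_cons (c : Char) (cs : List Char) (s : Int) :
    pvAlphaIdx (c :: cs) s
      = (if PySem.Chars.isalpha c then [s] else []) ++ pvAlphaIdx cs (s + 1) := by
  simp only [pvAlphaIdx, PySem.List.enumerate_cons, List.filter_cons]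
  split_ifs <;> simp

theorem pvAlphaIdx_append_singleton (t : List Char) (c : Char) (s : Int) :
    pvAlphaIdx (t ++ [c]) s
      = pvAlphaIdx t s ++ (if PySem.Chars.isalpha c then [s + t.length] else []) := by
  simp only [pvAlphaIdx, PySem.List.enumerate_append, List.filter_append, List.map_append]
  congr 1
  simp only [PySem.List.enumerate_cons, PySem.List.enumerate_nil, List.filter_cons]
  split_ifs <;> simp

theorem pvFwdLoop_range (t : List Char) (full : List Char) (a : Int)
    (h : ∀ k : Nat, k < t.length → PySem.List.pyGetD full (a + k) ' ' = t.getD k ' ') :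
    pvFwdLoop full (PySem.List.pyRange a (a + t.length) 1) = (pvAlphaIdx t a).head? := by
  induction t generalizing a with
  | nil =>
      rw [show a + ((List.length ([] : List Char) : Int)) = a by simp,
        PySem.List.pyRange_one_eq_nil (le_refl a)]
      simp [pvFwdLoop, pvAlphaIdx_nil]
  | cons c t ih =>
      rw [PySem.List.pyRange_one_cons (by simp)]
      have h0 : PySem.List.pyGetD full a ' ' = c := by
        have := h 0 (by simp)
        simpa using this
      simp only [pvFwdLoop, h0, pvAlphaIdx_cons]
      by_cases hc : PySem.Chars.isalpha c = true
      · simp [hc]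
      · simp only [hc, if_false, Bool.false_eq_true, List.nil_append]
        rw [show a + ((List.length (c :: t) : Int)) = (a + 1) + (t.length : Int) by
          simp; omega]
        exact ih (a + 1) (fun k hk => by
          have := h (k + 1) (by simp; omega)
          simpa [add_assoc, add_comm 1 (k : Int)] using this)

theorem pvBwdLoop_range (t : List Char) (full : List Char) (a : Int)
    (h : ∀ k : Nat, k < t.length → PySem.List.pyGetD full (a + k) ' ' = t.getD k ' ') :
    pvBwdLoop full (PySem.List.pyRange (a + t.length - 1) (a - 1) (-1))
      = ((pvAlphaIdx t a).getLast?).map (· + 1) := by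
  induction t using List.reverseRecOn with
  | nil =>
      rw [show a + ((List.length ([] : List Char) : Int)) - 1 = a - 1 by simp,
        PySem.List.pyRange_neg_one_eq_nil (le_refl (a - 1))]
      simp [pvBwdLoop, pvAlphaIdx_nil]
  | append_singleton t c ih =>
      have hlen : a + ((t ++ [c]).length : Int) - 1 = a + t.length := by simp; omega
      rw [hlen, PySem.List.pyRange_neg_one_cons (by omega)]
      have hc0 : PySem.List.pyGetD full (a + t.length) ' ' = c := by
        have := h t.length (by simp)
        simpa [List.getD, List.getElem?_append_right (le_refl t.length)] using this
      simp only [pvBwdLoop, hc0, pvAlphaIdx_append_singleton]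
      by_cases hc : PySem.Chars.isalpha c = true
      · simp [hc]
      · simp only [hc, if_false, Bool.false_eq_true, List.append_nil]
        exact ih (fun k hk => by
          have := h k (by simp; omega)
          simpa [List.getD, List.getElem?_append_left hk] using this)

theorem pvGetD_self (cs : List Char) :
    ∀ k : Nat, k < cs.length → PySem.List.pyGetD cs ((0 : Int) + k) ' ' = cs.getD k ' ' := by
  intro k _
  rw [show (0 : Int) + k = (k : Int) by omega]
  exact PySem.List.pyGetD_natCast cs k ' '

-- ===== VERDICT (by name: the statement is the Claim_ definition above) =====
theorem trim_non_letter_py_spec : Claim_equal_trim_non_letter_py := by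
  intro word _
  unfold Spec_trim_non_letter_py trim_non_letter_py trim_non_letter_py_alt
  rw [show PySem.Str.len word = ((word.toList.length : Nat) : Int) by simp]
  dsimp only
  have hfwd := pvFwdLoop_range word.toList word.toList 0 (pvGetD_self word.toList)
  have hbwd := pvBwdLoop_range word.toList word.toList 0 (pvGetD_self word.toList)
  rw [zero_add] at hfwd hbwd
  rw [zero_sub] at hbwd
  rw [hfwd, hbwd]
  cases hidx : pvAlphaIdx word.toList 0 with
  | nil =>
      simp only [Option.map_none, Option.getD_none, List.head?_nil, List.getLast?_nil]
      apply String.toList_inj.mp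
      simp [PySem.List.slice_zero_start, PySem.List.slice_to]
  | cons f rest =>
      have hne : f :: rest ≠ [] := by simp
      simp only [List.head?_cons, Option.getD_some,
        List.getLast?_eq_some_getLast hne, Option.map_some,
        PySem.List.pyGetD_neg_one (f :: rest) 0 hne]
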